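-- pv_equiv track=rewrite | github.com/dkswndms4782/AlgorithmWithPython | 프로그래머스/1/42862. 체육복/체육복.py | solution
-- ===== SOURCE A (Python) =====
-- def solution(n, lost, reserve):
--     re = sorted([i for i in reserve if i not in lost])
--     lo = sorted([i for i in lost if i not in reserve])
--     for r in re:
--         a = r-1
--         b = r+1
--         if a in lo:
--             lo.remove(a)
--             continue
--         if b in lo:
--             lo.remove(b)
--             continue
--     return n - len(lo)
-- ===== SOURCE B (Python) =====
-- def solution(n, lost, reserve):
--     lost_set = set(lost)
--     reserve_set = set(reserve)
--     re = sorted(r for r in reserve if r not in lost_set)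
--     lo = sorted(l for l in lost if l not in reserve_set)
--     i = j = 0
--     matched = 0
--     while i < len(re) and j < len(lo):
--         d = re[i] - lo[j]
--         if d == -1 or d == 1:
--             matched += 1
--             i += 1
--             j += 1
--         elif re[i] < lo[j]:
--             i += 1
--         else:
--             j += 1
--     return n - (len(lo) - matched)
-- ===== Notes on version B (the rewrite author's own statement) =====
-- stated objective: faster
-- what changed: A repeatedly does linear membership tests and list.remove() on the lost list for every reserve student (O(R*L) after sorting); B matches the two sorted lists with a single two-pointer merge that only counts matches and never mutates a list.
import Mathlib
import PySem

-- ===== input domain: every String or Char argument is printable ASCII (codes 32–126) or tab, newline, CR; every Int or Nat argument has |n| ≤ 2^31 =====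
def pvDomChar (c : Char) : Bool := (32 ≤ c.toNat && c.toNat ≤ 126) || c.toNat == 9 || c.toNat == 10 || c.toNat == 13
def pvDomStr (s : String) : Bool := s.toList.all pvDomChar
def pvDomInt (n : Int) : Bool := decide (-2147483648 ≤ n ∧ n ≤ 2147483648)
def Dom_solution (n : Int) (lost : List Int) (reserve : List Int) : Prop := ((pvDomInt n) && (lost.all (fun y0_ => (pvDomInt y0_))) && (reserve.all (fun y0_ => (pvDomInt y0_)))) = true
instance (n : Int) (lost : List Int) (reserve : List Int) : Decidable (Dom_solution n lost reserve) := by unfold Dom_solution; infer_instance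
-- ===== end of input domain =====

-- B replaces A's scan of reserves with repeated list membership/remove by a single
-- two-pointer merge of the two sorted lists (alternative decomposition; same result).

-- ===== PORT A =====
-- one iteration of A's `for r in re` loop body, state = the list lo
def solutionStep (lo : List Int) (r : Int) : List Int :=
  let a := r - 1
  let b := r + 1
  if a ∈ lo then (PySem.List.remove? lo a).getD lo
  else if b ∈ lo then (PySem.List.remove? lo b).getD lo
  else lo

def solution (n : Int) (lost : List Int) (reserve : List Int) : Int :=
  let re := PySem.List.sorted (reserve.filter (fun i => !decide (i ∈ lost))) (fun x => x) false
  let lo := PySem.List.sorted (lost.filter (fun i => !decide (i ∈ reserve))) (fun x => x) false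
  let lo' := re.foldl solutionStep lo
  n - (lo'.length : Int)

-- ===== PORT B =====
-- Source B's while loop over indices i, j, transcribed as the structural recursion on
-- the two suffixes re[i:], lo[j:]; returns the final value of `matched`
def twoPointer : List Int → List Int → Int
  | [], _ => 0
  | _ :: _, [] => 0
  | r :: re, l :: lo =>
    let d := r - l
    if d = -1 ∨ d = 1 then twoPointer re lo + 1
    else if r < l then twoPointer re (l :: lo)
    else twoPointer (r :: re) lo
termination_by re lo => re.length + lo.length

def solution_alt (n : Int) (lost : List Int) (reserve : List Int) : Int :=
  let lostSet := PySem.Set.ofList lost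
  let reserveSet := PySem.Set.ofList reserve
  let re := PySem.List.sorted (reserve.filter (fun r => !decide (r ∈ lostSet))) (fun x => x) false
  let lo := PySem.List.sorted (lost.filter (fun l => !decide (l ∈ reserveSet))) (fun x => x) false
  n - ((lo.length : Int) - twoPointer re lo)

-- ===== PRECONDITION & SPEC =====
def Spec_solution (n : Int) (lost : List Int) (reserve : List Int) (out : Int) : Prop := out = solution_alt n lost reserve
instance (n : Int) (lost : List Int) (reserve : List Int) (out : Int) : Decidable (Spec_solution n lost reserve out) := by unfold Spec_solution; infer_instance

-- ===== CLAIM (what is proved, stated in full; the proofs are below) =====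
def Claim_equal_solution : Prop := ∀ (n : Int) (lost : List Int) (reserve : List Int), Dom_solution n lost reserve → Spec_solution n lost reserve (solution n lost reserve)

-- ===== LEMMAS AND PROOFS =====

theorem step_eq_erase (lo : List Int) (r : Int) :
    solutionStep lo r =
      if r - 1 ∈ lo then lo.erase (r - 1)
      else if r + 1 ∈ lo then lo.erase (r + 1) else lo := by
  unfold solutionStep
  by_cases h1 : r - 1 ∈ lo
  · simp [h1, PySem.List.remove?_eq_some_erase _ _ h1]
  · by_cases h2 : r + 1 ∈ lo
    · simp [h1, h2, PySem.List.remove?_eq_some_erase _ _ h2]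
    · simp [h1, h2]

theorem step_nil (r : Int) : solutionStep [] r = [] := by
  simp [step_eq_erase]

theorem fold_nil (re : List Int) : re.foldl solutionStep [] = [] := by
  induction re with
  | nil => rfl
  | cons r re ih => simpa [step_nil] using ih

theorem step_cons (l : Int) (lo : List Int) (r : Int) (h : l + 1 < r) :
    solutionStep (l :: lo) r = l :: solutionStep lo r := by
  have h1 : ¬ (r - 1 = l) := by omega
  have h2 : ¬ (r + 1 = l) := by omega
  have h1' : ¬ (l = r - 1) := by omega
  have h2' : ¬ (l = r + 1) := by omega
  rw [step_eq_erase, step_eq_erase]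
  simp only [List.mem_cons, h1, h2, false_or, List.erase_cons, beq_iff_eq, h1', h2', if_false]
  split_ifs <;> rfl

theorem fold_cons (re : List Int) (l : Int) (lo : List Int)
    (h : ∀ r ∈ re, l + 1 < r) :
    re.foldl solutionStep (l :: lo) = l :: re.foldl solutionStep lo := by
  induction re generalizing lo with
  | nil => rfl
  | cons r re ih =>
    have hr : l + 1 < r := h r (by simp)
    simp only [List.foldl_cons, step_cons l lo r hr]
    exact ih (solutionStep lo r) (fun x hx => h x (List.mem_cons_of_mem _ hx))

theorem step_small (l : Int) (lo : List Int) (r : Int)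
    (hlo : ∀ x ∈ lo, l ≤ x) (h : r + 1 < l) :
    solutionStep (l :: lo) r = l :: lo := by
  rw [step_eq_erase]
  have m1 : r - 1 ∉ l :: lo := by
    intro hm
    rcases List.mem_cons.1 hm with h' | h'
    · omega
    · exact absurd (hlo _ h') (by omega)
  have m2 : r + 1 ∉ l :: lo := by
    intro hm
    rcases List.mem_cons.1 hm with h' | h'
    · omega
    · exact absurd (hlo _ h') (by omega)
  simp [m1, m2]

theorem main_lemma : ∀ (k : Nat) (re lo : List Int), re.length + lo.length ≤ k →
    re.Pairwise (· ≤ ·) → lo.Pairwise (· ≤ ·) → (∀ x ∈ re, x ∉ lo) →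
    ((re.foldl solutionStep lo).length : Int) + twoPointer re lo = (lo.length : Int) := by
  intro k
  induction k with
  | zero =>
    intro re lo hk _ _ _
    have : re = [] ∧ lo = [] := by
      constructor <;> (apply List.eq_nil_of_length_eq_zero; omega)
    simp [this.1, this.2, twoPointer]
  | succ k ih =>
    intro re lo hk hre hlo hdisj
    match re, lo with
    | [], lo => simp [twoPointer]
    | r :: re, [] => simp [twoPointer, step_nil, fold_nil]
    | r :: re, l :: lo =>
      have hre' : re.Pairwise (· ≤ ·) := (List.pairwise_cons.1 hre).2
      have hre_ge : ∀ x ∈ re, r ≤ x := (List.pairwise_cons.1 hre).1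
      have hlo' : lo.Pairwise (· ≤ ·) := (List.pairwise_cons.1 hlo).2
      have hlo_ge : ∀ x ∈ lo, l ≤ x := (List.pairwise_cons.1 hlo).1
      have hne : r ≠ l := by
        intro h; exact hdisj r (by simp) (by simp [h])
      rcases lt_trichotomy (r - l) 0 with hd | hd | hd
      · -- r < l
        by_cases hd1 : r - l = -1
        · -- l = r + 1 : match
          have hl : l = r + 1 := by omega
          have hstep : solutionStep (l :: lo) r = lo := by
            have m1 : r - 1 ∉ l :: lo := by
              intro hm
              rcases List.mem_cons.1 hm with h' | h'
              · omega
              · exact absurd (hlo_ge _ h') (by omega)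
            rw [step_eq_erase, if_neg m1, if_pos (by simp [hl]), hl, List.erase_cons_head]
          have := ih re lo (by simp at hk ⊢; omega) hre' hlo'
            (fun x hx hm => hdisj x (by simp [hx]) (by simp [hm]))
          simp only [List.foldl_cons, hstep, twoPointer]
          rw [if_pos (by omega : r - l = -1 ∨ r - l = 1)]
          simp only [List.length_cons]
          omega
        · -- r + 1 < l : skip r (A's step is a no-op)
          have hlt : r + 1 < l := by omega
          have hstep := step_small l lo r hlo_ge hlt
          have := ih re (l :: lo) (by simp at hk ⊢; omega) hre' hlo
            (fun x hx hm => hdisj x (by simp [hx]) hm)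
          simp only [List.foldl_cons, hstep, twoPointer]
          rw [if_neg (by omega : ¬ (r - l = -1 ∨ r - l = 1)), if_pos (by omega : r < l)]
          omega
      · exact absurd (by omega : r = l) hne
      · -- l < r
        by_cases hd1 : r - l = 1
        · -- l = r - 1 : match
          have hl : l = r - 1 := by omega
          have hstep : solutionStep (l :: lo) r = lo := by
            rw [step_eq_erase]
            simp [← hl]
          have := ih re lo (by simp at hk ⊢; omega) hre' hlo'
            (fun x hx hm => hdisj x (by simp [hx]) (by simp [hm]))
          simp only [List.foldl_cons, hstep, twoPointer]
          rw [if_pos (by omega : r - l = -1 ∨ r - l = 1)]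
          simp only [List.length_cons]
          omega
        · -- l + 1 < r : l survives the whole fold
          have hlt : l + 1 < r := by omega
          have hall : ∀ x ∈ r :: re, l + 1 < x := by
            intro x hx
            rcases List.mem_cons.1 hx with h' | h'
            · omega
            · have := hre_ge x h'; omega
          have hfold := fold_cons (r :: re) l lo hall
          have := ih (r :: re) lo (by simp at hk ⊢; omega) hre hlo'
            (fun x hx hm => hdisj x hx (by simp [hm]))
          simp only [hfold, twoPointer]
          rw [if_neg (by omega : ¬ (r - l = -1 ∨ r - l = 1)), if_neg (by omega : ¬ r < l)]
          simp only [List.length_cons]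
          omega

-- ===== VERDICT (by name: the statement is the Claim_ definition above) =====
theorem solution_spec : Claim_equal_solution := by
  intro n lost reserve _
  unfold Spec_solution solution solution_alt
  have hfeq : (reserve.filter (fun r => !decide (r ∈ PySem.Set.ofList lost)))
      = (reserve.filter (fun i => !decide (i ∈ lost))) := by
    apply List.filter_congr
    intro x _
    simp [PySem.Set.mem_ofList]
  have hgeq : (lost.filter (fun l => !decide (l ∈ PySem.Set.ofList reserve)))
      = (lost.filter (fun i => !decide (i ∈ reserve))) := by
    apply List.filter_congr
    intro x _
    simp [PySem.Set.mem_ofList]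
  simp only [hfeq, hgeq]
  set re := PySem.List.sorted (reserve.filter (fun i => !decide (i ∈ lost))) (fun x => x) false with hre_def
  set lo := PySem.List.sorted (lost.filter (fun i => !decide (i ∈ reserve))) (fun x => x) false with hlo_def
  have hre : re.Pairwise (· ≤ ·) := by
    simpa using PySem.List.sorted_pairwise (xs := reserve.filter (fun i => !decide (i ∈ lost))) (key := fun x => x)
  have hlo : lo.Pairwise (· ≤ ·) := by
    simpa using PySem.List.sorted_pairwise (xs := lost.filter (fun i => !decide (i ∈ reserve))) (key := fun x => x)
  have hdisj : ∀ x ∈ re, x ∉ lo := by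
    intro x hx hm
    rw [hre_def, PySem.List.mem_sorted] at hx
    rw [hlo_def, PySem.List.mem_sorted] at hm
    have h1 := List.of_mem_filter hx
    have h2 := List.mem_of_mem_filter hm
    simp at h1
    exact h1 h2
  have := main_lemma (re.length + lo.length) re lo le_rfl hre hlo hdisj
  omega
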